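-- pv_equiv track=rewrite | github.com/posl/comment_recommendation | script/mod_gen/4_time/zh/120_C/7.py | solve
-- ===== SOURCE A (Python) =====
-- def solve(s):
--     s = list(s)
--     ans = 0
--     while True:
--         if len(s) == 0:
--             break
--         if s[0] == s[-1]:
--             ans += 1
--             s = s[1:-1]
--         else:
--             break
--     return ans
-- ===== SOURCE B (Python) =====
-- def solve(s):
--     ans = 0
--     i, j = 0, len(s) - 1
--     while i <= j and s[i] == s[j]:
--         ans += 1
--         i += 1
--         j -= 1
--     return ans
-- ===== Notes on version B (the rewrite author's own statement) =====
-- stated objective: faster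
-- what changed: Replaces the repeated list slicing s = s[1:-1] (a fresh copy per matched pair) with a two-pointer scan over the original string, so no copies are made.
import Mathlib
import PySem

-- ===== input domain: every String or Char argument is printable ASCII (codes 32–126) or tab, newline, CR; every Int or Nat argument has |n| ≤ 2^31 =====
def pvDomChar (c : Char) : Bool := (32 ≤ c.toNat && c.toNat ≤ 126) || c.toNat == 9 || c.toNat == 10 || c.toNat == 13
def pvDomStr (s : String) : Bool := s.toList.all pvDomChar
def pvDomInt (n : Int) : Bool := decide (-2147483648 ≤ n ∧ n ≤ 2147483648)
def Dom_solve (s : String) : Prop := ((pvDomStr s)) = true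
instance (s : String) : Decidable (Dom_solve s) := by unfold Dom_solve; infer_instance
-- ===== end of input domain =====

-- B replaces A's per-iteration list slicing (s = s[1:-1], a fresh copy each round) with a
-- two-pointer scan over the fixed string; objective: faster.

-- ===== PORT A =====
-- A's while-loop: shrink the list by s = s[1:-1] while the two ends match, counting.
def solveLoop (l : List Char) (ans : Int) : Int :=
  if h : l = [] then ans
  else if l.head h = l.getLast h then
    solveLoop (PySem.List.slice l (some 1) (some (-1))) (ans + 1)
  else ans
termination_by l.length
decreasing_by
  have hl : 0 < l.length := List.length_pos_iff.mpr h
  have := PySem.List.length_slice l (1 : Int) (-1)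
  simp [PySem.List.clampIdx, h] at this
  omega

def solve (s : String) : Int := solveLoop s.toList 0

-- ===== PORT B =====
-- B's while-loop: two pointers i, j over the fixed char list.
def solveAltLoop (a : List Char) (i j ans : Int) : Int :=
  if _h : i ≤ j then
    if a.getD i.toNat ' ' = a.getD j.toNat ' ' then
      solveAltLoop a (i + 1) (j - 1) (ans + 1)
    else ans
  else ans
termination_by (j + 1 - i).toNat
decreasing_by omega

def solve_alt (s : String) : Int :=
  let a := s.toList
  solveAltLoop a 0 ((a.length : Int) - 1) 0

-- ===== PRECONDITION & SPEC =====
def Spec_solve (s : String) (out : Int) : Prop := out = solve_alt s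
instance (s : String) (out : Int) : Decidable (Spec_solve s out) := by unfold Spec_solve; infer_instance

-- ===== CLAIM (what is proved, stated in full; the proofs are below) =====
def Claim_equal_solve : Prop := ∀ (s : String), Dom_solve s → Spec_solve s (solve s)

-- ===== LEMMAS AND PROOFS =====

lemma getD_mid (p l q : List Char) (k : Nat) (hk : k < l.length) :
    (p ++ l ++ q).getD (p.length + k) ' ' = l.getD k ' ' := by
  rw [List.append_assoc]
  simp only [List.getD]
  rw [List.getElem?_append_right (by omega)]
  simp only [Nat.add_sub_cancel_left]
  rw [List.getElem?_append_left hk]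

lemma getD_head (l : List Char) (hne : l ≠ []) : l.getD 0 ' ' = l.head hne := by
  simp [List.getD, List.getElem?_eq_getElem (List.length_pos_iff.mpr hne), List.getElem_zero_eq_head]

lemma getD_last (l : List Char) (hne : l ≠ []) : l.getD (l.length - 1) ' ' = l.getLast hne := by
  simp [List.getD, ← List.getLast?_eq_getElem?, List.getLast?_eq_some_getLast hne]

lemma decomp (l : List Char) (h : l ≠ []) (h2 : 2 ≤ l.length) :
    l = l.head h :: (l.tail.dropLast ++ [l.getLast h]) := by
  have ht : l.tail ≠ [] := by
    have : l.tail.length = l.length - 1 := List.length_tail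
    intro he; rw [he] at this; simp at this; omega
  conv_lhs => rw [← List.cons_head_tail h]
  congr 1
  rw [← List.getLast_tail ht]
  exact (List.dropLast_append_getLast ht).symm

-- the generalized correspondence: B's loop on p ++ l ++ q, pointers at l's ends, equals A's loop on l
lemma key : ∀ n (l p q : List Char) (ans : Int), l.length = n →
    solveAltLoop (p ++ l ++ q) (p.length : Int) ((p.length : Int) + l.length - 1) ans
      = solveLoop l ans := by
  intro n
  induction n using Nat.strong_induction_on with
  | _ n ih =>
    intro l p q ans hn
    by_cases hne : l = []
    · subst hne
      rw [solveAltLoop, solveLoop]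
      simp
    · have hl1 : 1 ≤ l.length := List.length_pos_iff.mpr hne
      have hij : (p.length : Int) ≤ (p.length : Int) + l.length - 1 := by omega
      have hit : ((p.length : Int)).toNat = p.length + 0 := by omega
      have hjt : ((p.length : Int) + l.length - 1).toNat = p.length + (l.length - 1) := by omega
      rw [solveAltLoop, dif_pos hij, hit, hjt,
          getD_mid p l q 0 (by omega), getD_mid p l q (l.length - 1) (by omega),
          getD_head l hne, getD_last l hne]
      rw [solveLoop, dif_neg hne]
      by_cases hc : l.head hne = l.getLast hne
      · rw [if_pos hc, if_pos hc]
        by_cases h1 : l.length = 1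
        · -- one element left: both sides finish with ans + 1
          rw [solveAltLoop, dif_neg (by omega)]
          obtain ⟨c, rfl⟩ := List.length_eq_one_iff.mp h1
          have : PySem.List.slice [c] (some 1) (some (-1)) = ([] : List Char) := by
            simp [PySem.List.slice, PySem.List.clampIdx]
          rw [this, solveLoop]
          simp
        · have h2 : 2 ≤ l.length := by omega
          have hd := decomp l hne h2
          have hinner : PySem.List.slice l (some 1) (some (-1)) = l.tail.dropLast := by
            have hl0 : 0 < l.length := by omega
            simp [PySem.List.slice, PySem.List.clampIdx, hne]
            have e1 : min 1 l.length = 1 := by omega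
            have e2 : ((l.length : Int) + -1).toNat = l.length - 1 := by omega
            rw [e1, e2, List.dropLast_eq_take]
            congr 1
            · simp
            · exact List.drop_one
          rw [hinner]
          have hlin : l.tail.dropLast.length = l.length - 2 := by
            rw [List.length_dropLast, List.length_tail]; omega
          have hre : p ++ l ++ q
              = (p ++ [l.head hne]) ++ l.tail.dropLast ++ (l.getLast hne :: q) := by
            conv_lhs => rw [hd]
            simp
          have hrec := ih (l.length - 2) (by omega) l.tail.dropLast
            (p ++ [l.head hne]) (l.getLast hne :: q) (ans + 1) hlin
          rw [hre]
          have e1 : (p.length : Int) + 1 = (((p ++ [l.head hne]).length : Nat) : Int) := by simp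
          have e2 : (p.length : Int) + l.length - 1 - 1
              = (((p ++ [l.head hne]).length : Nat) : Int) + l.tail.dropLast.length - 1 := by
            rw [hlin, List.length_append, List.length_cons, List.length_nil,
               Nat.cast_sub h2]
            push_cast
            ring
          rw [e1, e2]
          exact hrec
      · rw [if_neg hc, if_neg hc]

-- ===== VERDICT (by name: the statement is the Claim_ definition above) =====
theorem solve_spec : Claim_equal_solve := by
  intro s _
  unfold Spec_solve solve solve_alt
  have := key s.toList.length s.toList [] [] 0 rfl
  simpa using this.symm
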